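-- pv_equiv track=rewrite | github.com/EngelsI/Palaeobot | benchmark1.py | find_shared
-- ===== SOURCE A (Python) =====
-- def find_shared(psm_casa, psm_Palaeo, psm_casaun):
--     casa_Palaeo = 0
--     for seq in set(list(set(psm_Palaeo).intersection(set(psm_casa)))):
--         if seq not in psm_casaun:
--             in_Palaeo = psm_Palaeo.count(seq)
--             in_casa = psm_casa.count(seq)
--             casa_Palaeo += min(in_Palaeo, in_casa)
--         else:
--             in_casaun = psm_casaun.count(seq)
--             in_Palaeo = psm_Palaeo.count(seq)
--             in_casa = psm_casa.count(seq)
--             if in_casaun < min(in_Palaeo, in_casa):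
--                 casa_Palaeo += min(in_Palaeo, in_casa)-in_casaun
--     casa_casaun = 0
--     for seq in set(list(set(psm_casa).intersection(set(psm_casaun)))):
--         if seq not in psm_Palaeo:
--             in_casa = psm_casa.count(seq)
--             in_casaun = psm_casaun.count(seq)
--             casa_casaun += min(in_casa, in_casaun)
--         else:
--             in_casaun = psm_casaun.count(seq)
--             in_Palaeo = psm_Palaeo.count(seq)
--             in_casa = psm_casa.count(seq)
--             if in_Palaeo < min(in_casaun, in_casa):
--                 casa_casaun += min(in_casaun, in_casa)-in_Palaeo
--     Palaeo_casaun = 0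
--     for seq in set(list(set(psm_Palaeo).intersection(set(psm_casaun)))):
--         if seq not in psm_casa:
--             in_Palaeo = psm_Palaeo.count(seq)
--             in_casaun = psm_casaun.count(seq)
--             Palaeo_casaun += min(in_Palaeo, in_casaun)
--         else:
--             in_casaun = psm_casaun.count(seq)
--             in_Palaeo = psm_Palaeo.count(seq)
--             in_casa = psm_casa.count(seq)
--             if in_casa < min(in_Palaeo, in_casaun):
--                 Palaeo_casaun += min(in_Palaeo, in_casaun)-in_casa
--     return casa_Palaeo, casa_casaun, Palaeo_casaun
-- ===== SOURCE B (Python) =====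
-- def find_shared(psm_casa, psm_Palaeo, psm_casaun):
--     def counts(lst):
--         c = {}
--         for s in lst:
--             c[s] = c.get(s, 0) + 1
--         return c
--     ca = counts(psm_casa)
--     cP = counts(psm_Palaeo)
--     cu = counts(psm_casaun)
--     casa_Palaeo = 0
--     casa_casaun = 0
--     Palaeo_casaun = 0
--     for seq in set(ca) | set(cP) | set(cu):
--         a = ca.get(seq, 0)
--         P = cP.get(seq, 0)
--         u = cu.get(seq, 0)
--         casa_Palaeo += max(0, min(P, a) - u)
--         casa_casaun += max(0, min(a, u) - P)
--         Palaeo_casaun += max(0, min(P, u) - a)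
--     return casa_Palaeo, casa_casaun, Palaeo_casaun
-- ===== Notes on version B (the rewrite author's own statement) =====
-- stated objective: faster
-- what changed: Replaces A's three pairwise-intersection scans with branchy clamped-difference logic (repeated list.count and 'in' scans inside each loop) by building three count dictionaries once and making a single pass over the union of all distinct sequences, adding the uniform max(0, min(x,y)-z) contribution to each of the three accumulators.
import Mathlib
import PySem

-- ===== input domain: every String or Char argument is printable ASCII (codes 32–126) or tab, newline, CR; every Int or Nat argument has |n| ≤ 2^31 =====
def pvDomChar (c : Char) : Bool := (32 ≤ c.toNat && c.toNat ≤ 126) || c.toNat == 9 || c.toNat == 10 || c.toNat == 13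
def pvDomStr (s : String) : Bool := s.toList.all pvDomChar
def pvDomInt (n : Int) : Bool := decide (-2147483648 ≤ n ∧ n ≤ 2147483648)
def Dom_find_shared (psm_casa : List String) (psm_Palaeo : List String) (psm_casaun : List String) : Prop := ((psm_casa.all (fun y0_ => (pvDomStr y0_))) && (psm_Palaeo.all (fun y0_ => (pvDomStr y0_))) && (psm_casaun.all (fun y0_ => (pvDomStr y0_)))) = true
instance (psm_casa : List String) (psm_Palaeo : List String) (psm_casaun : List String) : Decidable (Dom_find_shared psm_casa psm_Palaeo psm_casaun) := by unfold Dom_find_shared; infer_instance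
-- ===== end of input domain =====

-- B replaces A's three pairwise-intersection scans (with repeated list.count calls and
-- branchy clamped-difference logic) by three count dictionaries built once and a single
-- pass over the union of all distinct sequences using the uniform max(0, min(x,y)-z) formula
-- (alternative decomposition; result proved identical).

-- ===== PORT A =====
def find_shared (psm_casa : List String) (psm_Palaeo : List String) (psm_casaun : List String) : List Int :=
  let casa_Palaeo : Int :=
    (PySem.Set.ofList (PySem.Set.inter (PySem.Set.ofList psm_Palaeo) (PySem.Set.ofList psm_casa))).foldl
      (fun acc seq =>
        if seq ∉ psm_casaun then
          let in_Palaeo : Int := PySem.List.count psm_Palaeo seq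
          let in_casa : Int := PySem.List.count psm_casa seq
          acc + min in_Palaeo in_casa
        else
          let in_casaun : Int := PySem.List.count psm_casaun seq
          let in_Palaeo : Int := PySem.List.count psm_Palaeo seq
          let in_casa : Int := PySem.List.count psm_casa seq
          if in_casaun < min in_Palaeo in_casa then acc + (min in_Palaeo in_casa - in_casaun)
          else acc) 0
  let casa_casaun : Int :=
    (PySem.Set.ofList (PySem.Set.inter (PySem.Set.ofList psm_casa) (PySem.Set.ofList psm_casaun))).foldl
      (fun acc seq =>
        if seq ∉ psm_Palaeo then
          let in_casa : Int := PySem.List.count psm_casa seq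
          let in_casaun : Int := PySem.List.count psm_casaun seq
          acc + min in_casa in_casaun
        else
          let in_casaun : Int := PySem.List.count psm_casaun seq
          let in_Palaeo : Int := PySem.List.count psm_Palaeo seq
          let in_casa : Int := PySem.List.count psm_casa seq
          if in_Palaeo < min in_casaun in_casa then acc + (min in_casaun in_casa - in_Palaeo)
          else acc) 0
  let Palaeo_casaun : Int :=
    (PySem.Set.ofList (PySem.Set.inter (PySem.Set.ofList psm_Palaeo) (PySem.Set.ofList psm_casaun))).foldl
      (fun acc seq =>
        if seq ∉ psm_casa then
          let in_Palaeo : Int := PySem.List.count psm_Palaeo seq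
          let in_casaun : Int := PySem.List.count psm_casaun seq
          acc + min in_Palaeo in_casaun
        else
          let in_casaun : Int := PySem.List.count psm_casaun seq
          let in_Palaeo : Int := PySem.List.count psm_Palaeo seq
          let in_casa : Int := PySem.List.count psm_casa seq
          if in_casa < min in_Palaeo in_casaun then acc + (min in_Palaeo in_casaun - in_casa)
          else acc) 0
  [casa_Palaeo, casa_casaun, Palaeo_casaun]

-- ===== PORT B =====
-- Source B's helper counts(lst): a dict built by c[s] = c.get(s, 0) + 1
def pvCounts (lst : List String) : PySem.Dict String Int :=
  lst.foldl (fun c s => c.insert s (c.getD s 0 + 1)) PySem.Dict.empty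

def find_shared_alt (psm_casa : List String) (psm_Palaeo : List String) (psm_casaun : List String) : List Int :=
  let ca := pvCounts psm_casa
  let cP := pvCounts psm_Palaeo
  let cu := pvCounts psm_casaun
  let un : PySem.Set String :=
    PySem.Set.union (PySem.Set.union (PySem.Set.ofList ca.keys) cP.keys) cu.keys
  let t :=
    un.foldl (fun (acc : Int × Int × Int) seq =>
      let a := ca.getD seq 0
      let P := cP.getD seq 0
      let u := cu.getD seq 0
      (acc.1 + max 0 (min P a - u),
       acc.2.1 + max 0 (min a u - P),
       acc.2.2 + max 0 (min P u - a))) (0, 0, 0)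
  [t.1, t.2.1, t.2.2]

-- ===== PRECONDITION & SPEC =====
def Spec_find_shared (psm_casa : List String) (psm_Palaeo : List String) (psm_casaun : List String) (out : List Int) : Prop := out = find_shared_alt psm_casa psm_Palaeo psm_casaun
instance (psm_casa : List String) (psm_Palaeo : List String) (psm_casaun : List String) (out : List Int) : Decidable (Spec_find_shared psm_casa psm_Palaeo psm_casaun out) := by unfold Spec_find_shared; infer_instance

-- ===== CLAIM (what is proved, stated in full; the proofs are below) =====
def Claim_equal_find_shared : Prop := ∀ (psm_casa : List String) (psm_Palaeo : List String) (psm_casaun : List String), Dom_find_shared psm_casa psm_Palaeo psm_casaun → Spec_find_shared psm_casa psm_Palaeo psm_casaun (find_shared psm_casa psm_Palaeo psm_casaun)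

-- ===== LEMMAS AND PROOFS =====

-- integer count of s in l
def pvCnt (l : List String) (s : String) : Int := (l.count s : Int)

-- A's per-element contribution in the loop over x ∩ y with third list z
def pvContrib (x y z : List String) (s : String) : Int :=
  if s ∉ z then min (pvCnt x s) (pvCnt y s)
  else if pvCnt z s < min (pvCnt x s) (pvCnt y s) then min (pvCnt x s) (pvCnt y s) - pvCnt z s
  else 0

-- B's per-element contribution
def pvClamp (x y z : List String) (s : String) : Int :=
  max 0 (min (pvCnt x s) (pvCnt y s) - pvCnt z s)

lemma pvCounts_getD (lst : List String) (s : String) :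
    (pvCounts lst).getD s 0 = pvCnt lst s := by
  unfold pvCounts pvCnt
  rw [PySem.Dict.getD_foldl_insert_add_one]
  simp only [PySem.Dict.getD_empty, zero_add]

lemma pvCounts_keys (lst : List String) :
    (pvCounts lst).keys = PySem.Set.ofList lst := by
  unfold pvCounts
  rw [PySem.Dict.keys_foldl_insert]
  exact congrArg (fun k => PySem.Set.update k lst) rfl |>.trans (PySem.Set.update_nil_left lst)

lemma sum_map_eq_of_subset_of_zero (l u : List String) (g : String → Int)
    (hl : l.Nodup) (hu : u.Nodup) (hsub : ∀ s ∈ l, s ∈ u)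
    (hz : ∀ s ∈ u, s ∉ l → g s = 0) :
    (l.map g).sum = (u.map g).sum := by
  rw [← List.sum_toFinset _ hl, ← List.sum_toFinset _ hu]
  exact Finset.sum_subset
    (fun x hx => List.mem_toFinset.2 (hsub x (List.mem_toFinset.1 hx)))
    (fun x hx hnx => hz x (List.mem_toFinset.1 hx) (fun h => hnx (List.mem_toFinset.2 h)))

lemma mem_count_pos {l : List String} {s : String} (h : s ∈ l) : 1 ≤ pvCnt l s := by
  unfold pvCnt
  have := List.count_pos_iff.2 h
  omega

lemma not_mem_count_zero {l : List String} {s : String} (h : s ∉ l) : pvCnt l s = 0 := by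
  unfold pvCnt
  simp [List.count_eq_zero.2 h]

lemma contrib_eq_clamp (x y z : List String) (s : String) (hx : s ∈ x) (hy : s ∈ y) :
    pvContrib x y z s = pvClamp x y z s := by
  have hcx := mem_count_pos hx
  have hcy := mem_count_pos hy
  have hz0 : 0 ≤ pvCnt z s := by unfold pvCnt; positivity
  unfold pvContrib pvClamp
  by_cases hmem : s ∈ z
  · have hz1 := mem_count_pos hmem
    simp only [hmem, not_true_eq_false, if_false]
    split_ifs <;> omega
  · have := not_mem_count_zero hmem
    simp only [hmem, not_false_eq_true, if_true]
    omega

lemma clamp_zero_outside (x y z : List String) (s : String) (h : ¬ (s ∈ x ∧ s ∈ y)) :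
    pvClamp x y z s = 0 := by
  have hz0 : 0 ≤ pvCnt z s := by unfold pvCnt; positivity
  unfold pvClamp
  rcases Decidable.not_and_iff_not_or_not.1 h with hx | hy
  · have := not_mem_count_zero hx; omega
  · have := not_mem_count_zero hy; omega

-- the union list B iterates over
def pvUnion (psm_casa psm_Palaeo psm_casaun : List String) : List String :=
  PySem.Set.union (PySem.Set.union (PySem.Set.ofList (pvCounts psm_casa).keys) (pvCounts psm_Palaeo).keys) (pvCounts psm_casaun).keys

lemma mem_pvUnion (psm_casa psm_Palaeo psm_casaun : List String) (s : String) :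
    s ∈ pvUnion psm_casa psm_Palaeo psm_casaun ↔ s ∈ psm_casa ∨ s ∈ psm_Palaeo ∨ s ∈ psm_casaun := by
  unfold pvUnion
  rw [pvCounts_keys, pvCounts_keys, pvCounts_keys]
  simp [PySem.Set.mem_union, PySem.Set.mem_ofList, or_assoc]

lemma nodup_pvUnion (psm_casa psm_Palaeo psm_casaun : List String) :
    (pvUnion psm_casa psm_Palaeo psm_casaun).Nodup := by
  unfold pvUnion
  exact PySem.Set.nodup_union _ _ (PySem.Set.nodup_union _ _ (PySem.Set.nodup_ofList _))

-- one A-loop: the sum over the nodup intersection list of A's contribution equals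
-- the sum over the union list of B's clamped contribution
lemma pair_sum (x y z : List String) (U : List String) (hU : U.Nodup)
    (hmemU : ∀ s, s ∈ x ∧ s ∈ y → s ∈ U) :
    ((PySem.Set.ofList (PySem.Set.inter (PySem.Set.ofList x) (PySem.Set.ofList y))).map
      (fun s => pvContrib x y z s)).sum
      = (U.map (fun s => max 0 (min (pvCnt x s) (pvCnt y s) - pvCnt z s))).sum := by
  set L := PySem.Set.ofList (PySem.Set.inter (PySem.Set.ofList x) (PySem.Set.ofList y)) with hL
  have hmemL : ∀ s, s ∈ L ↔ s ∈ x ∧ s ∈ y := by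
    intro s
    simp [hL, PySem.Set.mem_ofList, PySem.Set.mem_inter]
  have h1 : L.map (fun s => pvContrib x y z s) = L.map (fun s => pvClamp x y z s) := by
    apply List.map_congr_left
    intro s hs
    rcases (hmemL s).1 hs with ⟨hx, hy⟩
    exact contrib_eq_clamp x y z s hx hy
  rw [h1]
  have h2 := sum_map_eq_of_subset_of_zero L U (pvClamp x y z) (PySem.Set.nodup_ofList _) hU
    (fun s hs => hmemU s ((hmemL s).1 hs))
    (fun s _ hns => clamp_zero_outside x y z s (fun h => hns ((hmemL s).2 h)))
  simpa only [pvClamp] using h2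

-- an A-loop fold is the sum of A's contributions
lemma foldA_eq_sum (l : List String) (F : Int → String → Int) (f : String → Int)
    (h : ∀ acc s, s ∈ l → F acc s = acc + f s) :
    l.foldl F 0 = (l.map f).sum := by
  have h1 : l.foldl F 0 = l.foldl (fun acc s => acc + f s) 0 := PySem.List.foldl_congr_mem l F (fun acc s => acc + f s) 0 h
  rw [h1, PySem.List.foldl_add]
  simp

-- B's single loop with three accumulators is three sums over the union
lemma foldB_triple (l : List String) (f g h : String → Int) :
    l.foldl (fun (acc : Int × Int × Int) x => (acc.1 + f x, acc.2.1 + g x, acc.2.2 + h x)) (0, 0, 0)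
      = ((l.map f).sum, (l.map g).sum, (l.map h).sum) := by
  rw [PySem.List.foldl_prod_mk (f := fun (acc : Int) x => acc + f x)
      (g := fun (acc : Int × Int) x => (acc.1 + g x, acc.2 + h x))]
  rw [PySem.List.foldl_prod_mk (f := fun (acc : Int) x => acc + g x)
      (g := fun (acc : Int) x => acc + h x)]
  rw [PySem.List.foldl_add, PySem.List.foldl_add, PySem.List.foldl_add]
  simp

theorem find_shared_spec : Claim_equal_find_shared := by
  intro psm_casa psm_Palaeo psm_casaun _
  unfold Spec_find_shared find_shared find_shared_alt
  dsimp only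
  simp only [pvCounts_getD]
  rw [foldB_triple]
  simp only [List.cons.injEq, and_true]
  refine ⟨?_, ?_, ?_⟩
  · rw [foldA_eq_sum _ _ (fun s => pvContrib psm_Palaeo psm_casa psm_casaun s)
      (by intro acc s _
          simp only [pvContrib, pvCnt, PySem.List.count_eq]
          split_ifs <;> omega)]
    exact pair_sum psm_Palaeo psm_casa psm_casaun _
      (nodup_pvUnion psm_casa psm_Palaeo psm_casaun)
      (fun s hs => (mem_pvUnion _ _ _ s).2 (Or.inr (Or.inl hs.1)))
  · rw [foldA_eq_sum _ _ (fun s => pvContrib psm_casa psm_casaun psm_Palaeo s)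
      (by intro acc s _
          simp only [pvContrib, pvCnt, PySem.List.count_eq]
          split_ifs <;> omega)]
    exact pair_sum psm_casa psm_casaun psm_Palaeo _
      (nodup_pvUnion psm_casa psm_Palaeo psm_casaun)
      (fun s hs => (mem_pvUnion _ _ _ s).2 (Or.inl hs.1))
  · rw [foldA_eq_sum _ _ (fun s => pvContrib psm_Palaeo psm_casaun psm_casa s)
      (by intro acc s _
          simp only [pvContrib, pvCnt, PySem.List.count_eq]
          split_ifs <;> omega)]
    exact pair_sum psm_Palaeo psm_casaun psm_casa _
      (nodup_pvUnion psm_casa psm_Palaeo psm_casaun)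
      (fun s hs => (mem_pvUnion _ _ _ s).2 (Or.inr (Or.inl hs.1)))
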